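-- pv_equiv track=rewrite | github.com/ricardozhang1/some_algorithm | trees.py | major_cnt
-- ===== SOURCE A (Python) =====
-- def major_cnt(class_list):
--     """处理最后一列"""
--     class_count = {}
--     for i in class_list:
--         if i not in class_count.keys():
--             class_count[i] = 1
--         else:
--             class_count[i] += 1
--     sorted_class_count = sorted(class_count.items(), key=lambda x: x[1], reverse=True)
--     return sorted_class_count
-- ===== SOURCE B (Python) =====
-- def major_cnt(class_list):
--     """处理最后一列"""
--     counts = {}
--     for c in class_list:
--         counts[c] = counts.get(c, 0) + 1
--     if not counts:
--         return []
--     buckets = {}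
--     for k, v in counts.items():
--         buckets.setdefault(v, []).append(k)
--     res = []
--     for c in range(max(buckets), 0, -1):
--         if c in buckets:
--             res.extend((k, c) for k in buckets[c])
--     return res
-- ===== Notes on version B (the rewrite author's own statement) =====
-- stated objective: alternative
-- what changed: Replaced the comparison sort (stable insertion sort with reverse=True) over dict items by a counting/bucket sort: keys are bucketed by their count and emitted from the maximum count down to 1, preserving first-seen order within each count.
import Mathlib
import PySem

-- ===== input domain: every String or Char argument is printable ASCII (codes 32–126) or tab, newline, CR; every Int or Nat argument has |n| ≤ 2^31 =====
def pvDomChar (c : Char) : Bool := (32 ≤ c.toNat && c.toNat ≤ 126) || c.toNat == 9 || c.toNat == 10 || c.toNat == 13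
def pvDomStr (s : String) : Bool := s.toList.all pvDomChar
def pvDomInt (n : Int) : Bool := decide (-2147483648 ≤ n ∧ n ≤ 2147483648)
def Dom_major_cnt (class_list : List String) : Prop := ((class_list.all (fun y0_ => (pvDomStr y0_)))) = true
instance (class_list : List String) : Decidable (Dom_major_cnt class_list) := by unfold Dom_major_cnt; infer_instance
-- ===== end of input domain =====

-- B replaces A's comparison sort (stable insertion sort, reverse=True) by a counting/bucket
-- sort: keys are bucketed by their count and emitted from the maximum count down (objective: alternative).

-- ===== PORT A =====
def major_cnt (class_list : List String) : List (String × Int) :=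
  let class_count : PySem.Dict String Int :=
    class_list.foldl (fun class_count i =>
      if class_count.contains i = false then
        class_count.insert i 1
      else
        -- class_count[i] += 1 : key i is present in this branch, so getD i 0 is exact
        class_count.insert i (class_count.getD i 0 + 1))
      PySem.Dict.empty
  PySem.List.sorted class_count.items (fun x => x.2) true

-- ===== PORT B =====
def major_cnt_alt (class_list : List String) : List (String × Int) :=
  let counts : PySem.Dict String Int :=
    class_list.foldl (fun counts c => counts.modify c 0 (· + 1)) PySem.Dict.empty
  if counts.items.isEmpty then []
  else
    -- buckets.setdefault(v, []).append(k)  ==  buckets[v] = buckets.get(v, []) + [k]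
    let buckets : PySem.Dict Int (List String) :=
      counts.items.foldl (fun buckets kv => buckets.modify kv.2 [] (fun l => l ++ [kv.1]))
        PySem.Dict.empty
    match PySem.List.max? buckets.keys (fun x => x) with
    | none => []  -- unreachable: counts (hence buckets) is nonempty here
    | some mx =>
        (PySem.List.pyRange mx 0 (-1)).foldl (fun res c =>
          if buckets.contains c then res ++ (buckets.getD c []).map (fun k => (k, c)) else res) []

-- ===== PRECONDITION & SPEC =====
def Spec_major_cnt (class_list : List String) (out : List (String × Int)) : Prop := out = major_cnt_alt class_list
instance (class_list : List String) (out : List (String × Int)) : Decidable (Spec_major_cnt class_list out) := by unfold Spec_major_cnt; infer_instance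

-- ===== CLAIM (what is proved, stated in full; the proofs are below) =====
def Claim_equal_major_cnt : Prop := ∀ (class_list : List String), Dom_major_cnt class_list → Spec_major_cnt class_list (major_cnt class_list)

-- ===== LEMMAS AND PROOFS =====

-- the frequency dict both sides build
def pvCounts (class_list : List String) : PySem.Dict String Int :=
  class_list.foldl (fun counts c => counts.modify c 0 (· + 1)) PySem.Dict.empty

-- the buckets dict B builds from the items of a counts dict
def pvBuckets (ps : List (String × Int)) : PySem.Dict Int (List String) :=
  ps.foldl (fun buckets kv => buckets.modify kv.2 [] (fun l => l ++ [kv.1])) PySem.Dict.empty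

-- concatenation of the per-count filters, counts descending: the target shape of both sides
def pvFlat (m : Int) (ps : List (String × Int)) : List (String × Int) :=
  (PySem.List.pyRange m 0 (-1)).flatMap (fun c => ps.filter (fun p => p.2 == c))

-- A's step function equals B's step function
theorem pv_step_eq (d : PySem.Dict String Int) (i : String) :
    (if d.contains i = false then d.insert i 1 else d.insert i (d.getD i 0 + 1))
      = d.modify i 0 (· + 1) := by
  by_cases h : d.contains i = true
  · simp [h, PySem.Dict.modify]
  · have h0 : d.getD i 0 = 0 := by
      have := (PySem.Dict.get?_eq_none_iff_contains d i).2 (by simpa using h)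
      simp [PySem.Dict.getD, this]
    simp [h, PySem.Dict.modify, h0]

theorem pv_counts_eq (class_list : List String) :
    class_list.foldl (fun class_count i =>
      if class_count.contains i = false then class_count.insert i 1
      else class_count.insert i (class_count.getD i 0 + 1)) PySem.Dict.empty
    = pvCounts class_list := by
  unfold pvCounts
  exact PySem.List.foldl_congr_mem _ _ _ _ (fun d i _ => pv_step_eq d i)

theorem pv_getD_nonneg (d : PySem.Dict String Int) (i : String)
    (h : ∀ p ∈ d.items, 1 ≤ p.2) : 0 ≤ d.getD i 0 := by
  unfold PySem.Dict.getD PySem.Dict.get?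
  cases hf : d.items.find? (fun p => p.1 == i) with
  | none => simp
  | some p =>
      have hp := List.mem_of_find?_eq_some hf
      have := h p hp
      simp; omega

-- every value in the counts dict is ≥ 1
theorem pv_counts_pos (class_list : List String) :
    ∀ p ∈ (pvCounts class_list).items, 1 ≤ p.2 := by
  unfold pvCounts
  suffices h : ∀ (l : List String) (d : PySem.Dict String Int),
      (∀ p ∈ d.items, 1 ≤ p.2) →
      ∀ p ∈ (l.foldl (fun counts c => counts.modify c 0 (· + 1)) d).items, 1 ≤ p.2 by
    exact h class_list PySem.Dict.empty (by simp [PySem.Dict.empty])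
  intro l
  induction l with
  | nil => intro d hd; simpa using hd
  | cons c t ih =>
      intro d hd
      simp only [List.foldl_cons]
      refine ih _ ?_
      have hv : 1 ≤ d.getD c 0 + 1 := by have := pv_getD_nonneg d c hd; omega
      intro p hp
      unfold PySem.Dict.modify PySem.Dict.insert at hp
      by_cases hc : d.contains c = true
      · simp only [hc, if_true] at hp
        simp only [List.mem_map] at hp
        obtain ⟨q, hq, hpq⟩ := hp
        by_cases hqk : (q.1 == c) = true
        · simp [hqk] at hpq; subst hpq; simpa using hv
        · simp [hqk] at hpq; subst hpq; exact hd q hq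
      · simp only [hc] at hp
        rcases List.mem_append.1 hp with h1 | h1
        · exact hd _ h1
        · simp at h1; subst h1; simpa using hv

-- insertBy walks past a prefix none of whose elements come 'before' x
theorem pv_insertBy_append (before : String × Int → String × Int → Bool) (x : String × Int)
    (as bs : List (String × Int)) (h : ∀ a ∈ as, before x a = false) :
    PySem.List.insertBy before x (as ++ bs) = as ++ PySem.List.insertBy before x bs := by
  induction as with
  | nil => simp
  | cons a t ih =>
      have ha : before x a = false := h a (by simp)
      simp only [List.cons_append, PySem.List.insertBy, ha]
      simp only [Bool.false_eq_true, if_false]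
      exact congrArg (a :: ·) (ih (fun b hb => h b (by simp [hb])))

-- insertBy goes to the front when every element comes 'before' x
theorem pv_insertBy_front (before : String × Int → String × Int → Bool) (x : String × Int)
    (bs : List (String × Int)) (h : ∀ b ∈ bs, before x b = true) :
    PySem.List.insertBy before x bs = x :: bs := by
  cases bs with
  | nil => rfl
  | cons b t => simp [PySem.List.insertBy, h b (by simp)]

theorem pv_flat_append_high (m : Int) (ps : List (String × Int)) (x : String × Int)
    (hx : m < x.2) : pvFlat m (ps ++ [x]) = pvFlat m ps := by
  unfold pvFlat
  refine List.flatMap_congr (fun c hc => ?_)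
  have hcm : 0 < c ∧ c ≤ m := (PySem.List.mem_pyRange_neg_one.1 hc)
  have : (x.2 == c) = false := by simp; omega
  simp [List.filter_append, this]

-- inserting x into the bucketed list appends x at the end of its own bucket
theorem pv_insertBy_flat (n : Nat) : ∀ (m : Int) (ps : List (String × Int)) (x : String × Int),
    m = n → 1 ≤ x.2 → x.2 ≤ m →
    PySem.List.insertBy (fun a b => decide (b.2 < a.2)) x (pvFlat m ps) = pvFlat m (ps ++ [x]) := by
  induction n with
  | zero => intro m ps x hm hx1 hx2; omega
  | succ k ih =>
      intro m ps x hm hx1 hx2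
      have hm0 : 0 < m := by omega
      have hrange : PySem.List.pyRange m 0 (-1) = m :: PySem.List.pyRange (m - 1) 0 (-1) :=
        PySem.List.pyRange_neg_one_cons hm0
      have hflat : ∀ qs : List (String × Int),
          pvFlat m qs = qs.filter (fun p => p.2 == m) ++ pvFlat (m - 1) qs := by
        intro qs; unfold pvFlat; rw [hrange]; simp [List.flatMap_cons]
      by_cases hxm : x.2 = m
      · -- x belongs to the top bucket: it passes bucket m and lands at its end
        rw [hflat ps, hflat (ps ++ [x])]
        rw [pv_insertBy_append _ _ _ _ (fun a ha => by
              have := List.of_mem_filter ha; simp at this; simp [this, hxm])]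
        rw [pv_insertBy_front _ _ _ (fun b hb => by
              unfold pvFlat at hb
              simp only [List.mem_flatMap] at hb
              obtain ⟨c, hc, hbc⟩ := hb
              have hcm := PySem.List.mem_pyRange_neg_one.1 hc
              have := List.of_mem_filter hbc; simp at this
              simp; omega)]
        rw [pv_flat_append_high (m - 1) ps x (by omega)]
        have : (ps ++ [x]).filter (fun p => p.2 == m) = ps.filter (fun p => p.2 == m) ++ [x] := by
          simp [List.filter_append, hxm]
        rw [this]; simp
      · -- x belongs to a lower bucket: it passes bucket m, then recurse
        rw [hflat ps, hflat (ps ++ [x])]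
        rw [pv_insertBy_append _ _ _ _ (fun a ha => by
              have := List.of_mem_filter ha; simp at this; simp [this]; omega)]
        rw [ih (m - 1) ps x (by omega) hx1 (by omega)]
        have : (ps ++ [x]).filter (fun p => p.2 == m) = ps.filter (fun p => p.2 == m) := by
          simp [List.filter_append]; omega
        rw [this]

-- the stable reverse insertion sort by count equals the bucket concatenation
theorem pv_foldl_flat (ps : List (String × Int)) (m : Int)
    (hps : ∀ p ∈ ps, 1 ≤ p.2 ∧ p.2 ≤ m) :
    ps.foldl (fun acc x => PySem.List.insertBy (fun a b => decide (b.2 < a.2)) x acc) []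
      = pvFlat m ps := by
  induction ps using List.reverseRecOn with
  | nil => unfold pvFlat; simp
  | append_singleton t x ih =>
      rw [List.foldl_append]
      simp only [List.foldl_cons, List.foldl_nil]
      rw [ih (fun p hp => hps p (by simp [hp]))]
      have hx := hps x (by simp)
      exact pv_insertBy_flat m.toNat m t x (by omega) hx.1 hx.2

-- bucket contents: the keys of the pairs with count c, in insertion order
theorem pv_buckets_getD (ps : List (String × Int)) (c : Int) :
    (pvBuckets ps).getD c [] = (ps.filter (fun p => p.2 == c)).map Prod.fst := by
  unfold pvBuckets
  induction ps using List.reverseRecOn with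
  | nil => simp [PySem.Dict.getD, PySem.Dict.get?, PySem.Dict.empty]
  | append_singleton t x ih =>
      rw [List.foldl_append]
      simp only [List.foldl_cons, List.foldl_nil]
      rw [PySem.Dict.getD_modify, List.filter_append]
      by_cases h : c = x.2
      · subst h; simp [ih]
      · have : (x.2 == c) = false := by simp; omega
        simp [h, ih, this]

theorem pv_buckets_contains (ps : List (String × Int)) (c : Int) :
    (pvBuckets ps).contains c = ps.any (fun p => p.2 == c) := by
  unfold pvBuckets
  induction ps using List.reverseRecOn with
  | nil => simp [PySem.Dict.contains, PySem.Dict.empty]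
  | append_singleton t x ih =>
      rw [List.foldl_append]
      simp only [List.foldl_cons, List.foldl_nil]
      rw [PySem.Dict.contains_modify]
      have hbeq : (c == x.2) = (x.2 == c) := by
        by_cases h : c = x.2
        · subst h; rfl
        · have h' : x.2 ≠ c := fun hh => h hh.symm
          simp [h, h']
      simp [ih, hbeq, Bool.or_comm]

theorem pv_buckets_keys (ps : List (String × Int)) (c : Int) :
    c ∈ (pvBuckets ps).keys ↔ c ∈ ps.map Prod.snd := by
  have h1 : c ∈ (pvBuckets ps).keys ↔ (pvBuckets ps).contains c = true := by
    unfold PySem.Dict.contains PySem.Dict.keys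
    rw [List.any_eq_true]
    constructor
    · intro h
      rw [List.mem_map] at h
      obtain ⟨p, hp, hpc⟩ := h
      exact ⟨p, hp, by simp [hpc]⟩
    · rintro ⟨p, hp, hpc⟩
      rw [List.mem_map]
      exact ⟨p, hp, by simpa using hpc⟩
  rw [h1, pv_buckets_contains, List.any_eq_true, List.mem_map]
  constructor
  · rintro ⟨p, hp, hpc⟩
    exact ⟨p, hp, by simpa using hpc⟩
  · rintro ⟨p, hp, hpc⟩
    exact ⟨p, hp, by simp [hpc]⟩

-- a bucket pairdback with its count is exactly the filter
theorem pv_filter_pair (ps : List (String × Int)) (c : Int) :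
    ((ps.filter (fun p => p.2 == c)).map Prod.fst).map (fun k => (k, c))
      = ps.filter (fun p => p.2 == c) := by
  rw [List.map_map]
  have : ∀ p ∈ ps.filter (fun p => p.2 == c), ((fun k => (k, c)) ∘ Prod.fst) p = id p := by
    intro p hp
    have := List.of_mem_filter hp
    cases p; simp_all
  rw [List.map_congr_left this, List.map_id]

-- B's emission loop produces the bucket concatenation
theorem pv_emit_flat (ps : List (String × Int)) (m : Int) :
    (PySem.List.pyRange m 0 (-1)).foldl (fun res c =>
        if (pvBuckets ps).contains c then res ++ ((pvBuckets ps).getD c []).map (fun k => (k, c))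
        else res) []
      = pvFlat m ps := by
  have hcong : ∀ (acc : List (String × Int)), ∀ c ∈ PySem.List.pyRange m 0 (-1),
      (if (pvBuckets ps).contains c then
          acc ++ ((pvBuckets ps).getD c []).map (fun k => (k, c)) else acc)
        = acc ++ ps.filter (fun p => p.2 == c) := by
    intro acc c _
    rw [pv_buckets_contains, pv_buckets_getD, pv_filter_pair]
    by_cases h : ps.any (fun p => p.2 == c) = true
    · simp [h]
    · have : ps.filter (fun p => p.2 == c) = [] := by
        rw [List.filter_eq_nil_iff]
        intro p hp
        simp only [List.any_eq_true, not_exists, not_and] at h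
        intro hc; exact absurd hc (by simpa using h p hp)
      simp [h, this]
  rw [PySem.List.foldl_congr_mem _ _ _ _ hcong,
      PySem.List.foldl_append_eq_flatMap (fun c => ps.filter (fun p => p.2 == c))]
  unfold pvFlat
  simp

theorem major_cnt_spec : Claim_equal_major_cnt := by
  intro class_list _
  unfold Spec_major_cnt major_cnt major_cnt_alt
  rw [pv_counts_eq]
  have hBC : List.foldl (fun counts c => counts.modify c 0 (· + 1)) PySem.Dict.empty class_list
      = pvCounts class_list := rfl
  rw [hBC]
  have hB : ∀ qs : List (String × Int),
      List.foldl (fun buckets kv => buckets.modify kv.2 [] (fun l => l ++ [kv.1]))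
        PySem.Dict.empty qs = pvBuckets qs := fun _ => rfl
  simp only [hB]
  have hpos := pv_counts_pos class_list
  generalize (pvCounts class_list).items = ps at hpos ⊢
  by_cases hempty : ps.isEmpty
  · have hnil : ps = [] := by simpa [List.isEmpty_iff] using hempty
    subst hnil
    simp [PySem.List.sorted]
  · simp only [hempty, Bool.false_eq_true, if_false]
    have hkeys : (pvBuckets ps).keys ≠ [] := by
      intro hk
      have hne : ps ≠ [] := by simpa [List.isEmpty_iff] using hempty
      obtain ⟨p, hp⟩ := List.exists_mem_of_ne_nil ps hne
      have : p.2 ∈ (pvBuckets ps).keys :=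
        (pv_buckets_keys ps p.2).2 (List.mem_map_of_mem hp)
      simp [hk] at this
    cases hmx : PySem.List.max? (pvBuckets ps).keys (fun x => x) with
    | none => exact absurd ((PySem.List.max?_eq_none_iff _ _).1 hmx) hkeys
    | some mx =>
        have hmax : ∀ y ∈ (pvBuckets ps).keys, y ≤ mx := by
          intro y hy
          simpa using PySem.List.max?_isMax hmx y hy
        have hbnd : ∀ p ∈ ps, 1 ≤ p.2 ∧ p.2 ≤ mx := by
          intro p hp
          exact ⟨hpos p hp,
            hmax p.2 ((pv_buckets_keys ps p.2).2 (List.mem_map_of_mem hp))⟩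
        rw [PySem.List.sorted_rev_eq_foldl_insertBy, pv_foldl_flat ps mx hbnd]
        exact (pv_emit_flat ps mx).symm
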